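-- pv_equiv track=rewrite | github.com/OmDesai04/-Medical-Report-Summarizer-Doctor-Patient- | src/app_streamlit.py | dedupe_lab_rows
-- ===== SOURCE A (Python) =====
-- def dedupe_lab_rows(lab_rows: list) -> list:
--     """Merge duplicate tests under canonical names (e.g., Gamma GT and GGT).
--     Prefer rows with explicit ranges or abnormal status.
--     """
--     canonical = {
--         'gamma gt': 'GGT',
--         'ggt': 'GGT',
--         'gamma g.t': 'GGT',
--         'gamma g t': 'GGT',
--         'alt (sgpt)': 'ALT (SGPT)',
--         'sgpt (alt)': 'ALT (SGPT)',
--         'ast (sgot)': 'AST (SGOT)',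
--         'sgot (ast)': 'AST (SGOT)',
--     }
--     merged = {}
--     for r in lab_rows:
--         name = r.get('Test','')
--         key = canonical.get(name.lower(), name)
--         r['Test'] = key
--         prev = merged.get(key)
--         if prev is None:
--             merged[key] = r
--             continue
--         # Prefer abnormal over normal
--         def score(x):
--             s = 1
--             if x.get('Status') in ('high','low','abnormal'):
--                 s += 2
--             # Prefer rows with both bounds present
--             if x.get('Ref Low') and x.get('Ref High'):
--                 s += 1
--             return s
--         merged[key] = max([prev, r], key=score)
--     return list(merged.values())
-- ===== SOURCE B (Python) =====
-- def dedupe_lab_rows(lab_rows: list) -> list: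
--     """Canonicalize every row's test name in place, then for each distinct name
--     (first-appearance order) return the best-scoring row among its occurrences."""
--
--     def canon(name):
--         low = name.lower()
--         if low in ('gamma gt', 'ggt', 'gamma g.t', 'gamma g t'):
--             return 'GGT'
--         if low in ('alt (sgpt)', 'sgpt (alt)'):
--             return 'ALT (SGPT)'
--         if low in ('ast (sgot)', 'sgot (ast)'):
--             return 'AST (SGOT)'
--         return name
--
--     def score(x):
--         return (1
--                 + (2 if x.get('Status') in ('high', 'low', 'abnormal') else 0)
--                 + (1 if (x.get('Ref Low') and x.get('Ref High')) else 0))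
--
--     for r in lab_rows:
--         r['Test'] = canon(r.get('Test', ''))
--
--     keys = []
--     for r in lab_rows:
--         if r['Test'] not in keys:
--             keys.append(r['Test'])
--
--     return [max((r for r in lab_rows if r['Test'] == k), key=score) for k in keys]
-- ===== Notes on version B (the rewrite author's own statement) =====
-- stated objective: alternative
-- what changed: Replaced A's single fold that keeps one winner row per canonical key in a dict by a staged pipeline: canonicalize every row's name (if-chain instead of a synonym dict), collect the distinct names in order with a list, then rescan the rows per name picking the first best-scoring row.
import Mathlib
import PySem

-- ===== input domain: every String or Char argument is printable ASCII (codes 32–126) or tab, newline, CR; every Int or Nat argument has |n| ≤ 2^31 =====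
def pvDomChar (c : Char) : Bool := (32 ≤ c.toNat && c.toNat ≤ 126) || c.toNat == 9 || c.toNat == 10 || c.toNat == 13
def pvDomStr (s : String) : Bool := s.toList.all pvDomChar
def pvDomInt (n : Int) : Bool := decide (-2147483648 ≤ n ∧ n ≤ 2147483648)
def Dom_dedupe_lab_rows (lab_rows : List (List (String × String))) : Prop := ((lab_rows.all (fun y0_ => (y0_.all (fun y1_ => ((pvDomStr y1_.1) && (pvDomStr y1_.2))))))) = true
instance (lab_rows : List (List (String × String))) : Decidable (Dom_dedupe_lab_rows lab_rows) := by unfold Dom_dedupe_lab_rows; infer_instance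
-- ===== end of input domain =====

-- B replaces A's one-pass fold that keeps one winner row per key in a dict by a staged
-- pipeline: canonicalize all names, collect the distinct names in order, then rescan the
-- rows per name for the best-scoring one (objective: alternative decomposition; return
-- value only is compared — both Pythons perform the same r['Test'] mutation on every row).

-- ===== PORT A =====

def pvCanonicalA : PySem.Dict String String := PySem.Dict.ofList
  [("gamma gt", "GGT"), ("ggt", "GGT"), ("gamma g.t", "GGT"), ("gamma g t", "GGT"),
   ("alt (sgpt)", "ALT (SGPT)"), ("sgpt (alt)", "ALT (SGPT)"),
   ("ast (sgot)", "AST (SGOT)"), ("sgot (ast)", "AST (SGOT)")]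

-- the nested 'def score(x)' of A
def pvScoreA (x : List (String × String)) : Int :=
  let s : Int := 1
  let s := if ((PySem.Dict.mk x).get? "Status" == some "high"
            || (PySem.Dict.mk x).get? "Status" == some "low"
            || (PySem.Dict.mk x).get? "Status" == some "abnormal") then s + 2 else s
  if ((PySem.Dict.mk x).getD "Ref Low" "" != "" && (PySem.Dict.mk x).getD "Ref High" "" != "")
  then s + 1 else s

-- one iteration of A's loop body
def pvStepA (merged : PySem.Dict String (List (String × String))) (r : List (String × String)) :
    PySem.Dict String (List (String × String)) :=
  let name := (PySem.Dict.mk r).getD "Test" ""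
  let key := pvCanonicalA.getD (PySem.Str.lower name) name
  let r := ((PySem.Dict.mk r).insert "Test" key).items
  match merged.get? key with
  | none => merged.insert key r
  | some prev =>  -- max([prev, r], key=score): first maximal element
      merged.insert key (if pvScoreA r > pvScoreA prev then r else prev)

def dedupe_lab_rows (lab_rows : List (List (String × String))) : List (List (String × String)) :=
  (lab_rows.foldl pvStepA PySem.Dict.empty).values

-- ===== PORT B =====

-- B's 'def canon(name)': an if-chain over the synonym tuples
def pvCanonB (name : String) : String :=
  let low := PySem.Str.lower name
  if low == "gamma gt" || low == "ggt" || low == "gamma g.t" || low == "gamma g t" then "GGT"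
  else if low == "alt (sgpt)" || low == "sgpt (alt)" then "ALT (SGPT)"
  else if low == "ast (sgot)" || low == "sgot (ast)" then "AST (SGOT)"
  else name

-- B's 'def score(x)': one arithmetic expression
def pvScoreB (x : List (String × String)) : Int :=
  1 + (if ((PySem.Dict.mk x).get? "Status" == some "high"
        || (PySem.Dict.mk x).get? "Status" == some "low"
        || (PySem.Dict.mk x).get? "Status" == some "abnormal") then 2 else 0)
    + (if ((PySem.Dict.mk x).getD "Ref Low" "" != ""
          && (PySem.Dict.mk x).getD "Ref High" "" != "") then 1 else 0)

-- "r['Test'] = canon(r.get('Test',''))" for one row (the loop is a map: rows are independent)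
def pvTagB (r : List (String × String)) : List (String × String) :=
  ((PySem.Dict.mk r).insert "Test" (pvCanonB ((PySem.Dict.mk r).getD "Test" ""))).items

-- "r['Test']" on a tagged row ('Test' is present in every tagged row, so the default is dead)
def pvTestOf (r : List (String × String)) : String := (PySem.Dict.mk r).getD "Test" ""

-- the 'keys' loop: distinct canonical names in first-appearance order
def pvKeysB (t : List (List (String × String))) : List String :=
  t.foldl (fun ks r => if pvTestOf r ∈ ks then ks else ks ++ [pvTestOf r]) []

-- max(generator, key=score): first maximal element of a nonempty list ([] unreachable)
def pvBestB (rows : List (List (String × String))) : List (String × String) :=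
  match rows with
  | [] => []
  | w :: rest => rest.foldl (fun w x => if pvScoreB x > pvScoreB w then x else w) w

def dedupe_lab_rows_alt (lab_rows : List (List (String × String))) : List (List (String × String)) :=
  let t := lab_rows.map pvTagB
  (pvKeysB t).map (fun k => pvBestB (t.filter (fun r => pvTestOf r == k)))

-- ===== PRECONDITION & SPEC =====
def Spec_dedupe_lab_rows (lab_rows : List (List (String × String))) (out : List (List (String × String))) : Prop := out = dedupe_lab_rows_alt lab_rows
instance (lab_rows : List (List (String × String))) (out : List (List (String × String))) : Decidable (Spec_dedupe_lab_rows lab_rows out) := by unfold Spec_dedupe_lab_rows; infer_instance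

-- ===== CLAIM (what is proved, stated in full; the proofs are below) =====
def Claim_equal_dedupe_lab_rows : Prop := ∀ (lab_rows : List (List (String × String))), Dom_dedupe_lab_rows lab_rows → Spec_dedupe_lab_rows lab_rows (dedupe_lab_rows lab_rows)

-- ===== LEMMAS AND PROOFS =====

-- the key A computes for a row
def pvKeyOf (r : List (String × String)) : String :=
  pvCanonB ((PySem.Dict.mk r).getD "Test" "")

-- what A stores at that key in one step
def pvPick (g : PySem.Dict String (List (String × String))) (r : List (String × String)) :
    List (String × String) :=
  match g.get? (pvKeyOf r) with
  | none => pvTagB r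
  | some prev => if pvScoreA (pvTagB r) > pvScoreA prev then pvTagB r else prev

-- running A's keep-the-winner over an optional current winner
def pvRun (o : Option (List (String × String))) (l : List (List (String × String))) :
    Option (List (String × String)) :=
  match l, o with
  | [], o => o
  | x :: l, none => pvRun (some x) l
  | x :: l, some w => pvRun (some (if pvScoreA x > pvScoreA w then x else w)) l
-- A's canonical-dict lookup is B's if-chain
theorem pvCanon_bridge (name : String) :
    pvCanonicalA.getD (PySem.Str.lower name) name = pvCanonB name := by
  have h : pvCanonicalA = PySem.Dict.mk
      [("gamma gt", "GGT"), ("ggt", "GGT"), ("gamma g.t", "GGT"), ("gamma g t", "GGT"),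
       ("alt (sgpt)", "ALT (SGPT)"), ("sgpt (alt)", "ALT (SGPT)"),
       ("ast (sgot)", "AST (SGOT)"), ("sgot (ast)", "AST (SGOT)")] := by rfl
  rw [h]
  unfold pvCanonB
  set low := PySem.Str.lower name with hl
  simp only [PySem.Dict.getD_eq_get?_getD, PySem.Dict.get?_mk_cons]
  rcases eq_or_ne low "gamma gt" with h1 | h1
  · simp [h1]
  rcases eq_or_ne low "ggt" with h2 | h2
  · simp [h2]
  rcases eq_or_ne low "gamma g.t" with h3 | h3
  · simp [h3]
  rcases eq_or_ne low "gamma g t" with h4 | h4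
  · simp [h4]
  rcases eq_or_ne low "alt (sgpt)" with h5 | h5
  · simp [h5]
  rcases eq_or_ne low "sgpt (alt)" with h6 | h6
  · simp [h6]
  rcases eq_or_ne low "ast (sgot)" with h7 | h7
  · simp [h7]
  rcases eq_or_ne low "sgot (ast)" with h8 | h8
  · simp [h8]
  simp [Ne.symm h1, Ne.symm h2, Ne.symm h3, Ne.symm h4,
        Ne.symm h5, Ne.symm h6, Ne.symm h7, Ne.symm h8, h1, h2, h3, h4, h5, h6, h7, h8]
  rfl

theorem pvScoreB_eq : pvScoreB = pvScoreA := by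
  funext x
  unfold pvScoreB pvScoreA
  by_cases h1 : ((PySem.Dict.mk x).get? "Status" == some "high"
            || (PySem.Dict.mk x).get? "Status" == some "low"
            || (PySem.Dict.mk x).get? "Status" == some "abnormal") = true <;>
  by_cases h2 : ((PySem.Dict.mk x).getD "Ref Low" "" != ""
            && (PySem.Dict.mk x).getD "Ref High" "" != "") = true <;>
  simp [h1, h2]

theorem pvStepA_eq_insert :
    pvStepA = fun g r => g.insert (pvKeyOf r) (pvPick g r) := by
  funext g r
  simp only [pvStepA, pvPick, pvKeyOf, pvTagB, pvCanon_bridge]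
  cases hg : g.get? (pvCanonB ((PySem.Dict.mk r).getD "Test" "")) <;> simp

theorem pvTestOf_tag (r : List (String × String)) : pvTestOf (pvTagB r) = pvKeyOf r := by
  show ((PySem.Dict.mk r).insert "Test" (pvCanonB ((PySem.Dict.mk r).getD "Test" ""))).getD "Test" ""
      = pvKeyOf r
  rw [PySem.Dict.getD_insert_self]
  rfl

theorem pvRun_some (l : List (List (String × String))) (w : List (String × String)) :
    pvRun (some w) l = some (l.foldl (fun w x => if pvScoreA x > pvScoreA w then x else w) w) := by
  induction l generalizing w with
  | nil => rfl
  | cons x l ih => simp only [pvRun, List.foldl_cons]; exact ih _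

theorem pvGet?_fold (rows : List (List (String × String)))
    (g : PySem.Dict String (List (String × String))) (k : String) :
    ((rows.foldl pvStepA g).get? k) =
      pvRun (g.get? k) ((rows.filter (fun r => pvKeyOf r == k)).map pvTagB) := by
  induction rows generalizing g with
  | nil => rfl
  | cons r rest ih =>
    simp only [List.foldl_cons, List.filter_cons]
    rw [ih, pvStepA_eq_insert]
    by_cases hk : pvKeyOf r = k
    · rw [PySem.Dict.get?_insert]
      simp only [hk, beq_self_eq_true, if_true, List.map_cons]
      unfold pvPick
      rw [hk]
      cases hg : g.get? k with
      | none => simp [pvRun]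
      | some prev => simp [pvRun]
    · rw [PySem.Dict.get?_insert]
      have hbk : (pvKeyOf r == k) = false := beq_eq_false_iff_ne.mpr hk
      simp [hbk, Ne.symm hk]

-- ===== VERDICT (by name: the statement is the Claim_ definition above) =====
theorem dedupe_lab_rows_spec : Claim_equal_dedupe_lab_rows := by
  intro rows _
  show dedupe_lab_rows rows = dedupe_lab_rows_alt rows
  unfold dedupe_lab_rows dedupe_lab_rows_alt
  show (rows.foldl pvStepA PySem.Dict.empty).values
      = (pvKeysB (rows.map pvTagB)).map
          (fun k => pvBestB ((rows.map pvTagB).filter (fun r => pvTestOf r == k)))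
  rw [pvStepA_eq_insert]
  set G := rows.foldl (fun g r => g.insert (pvKeyOf r) (pvPick g r)) PySem.Dict.empty with hG
  have hnd : G.keys.Nodup := by
    rw [hG]
    exact PySem.Dict.nodup_keys_foldl_insert_key rows pvKeyOf pvPick PySem.Dict.empty
      (by simp [PySem.Dict.keys_empty])
  have hkeys : G.keys = PySem.Set.ofList (rows.map pvKeyOf) := by
    rw [hG, PySem.Dict.keys_foldl_insert_key]
    simp [PySem.Dict.keys_empty, PySem.Set.update_nil_left]
  have hmt : (rows.map pvTagB).map pvTestOf = rows.map pvKeyOf := by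
    rw [List.map_map]
    exact List.map_congr_left fun r _ => pvTestOf_tag r
  have hKeysB : pvKeysB (rows.map pvTagB) = G.keys := by
    unfold pvKeysB
    have hfun : (fun (ks : List String) r => if pvTestOf r ∈ ks then ks else ks ++ [pvTestOf r])
        = fun ks r => PySem.Set.add ks (pvTestOf r) := by
      funext ks r; rw [PySem.Set.add_eq_ite]
    rw [hfun, ← PySem.Set.update_map_eq_foldl_add, PySem.Set.update_nil_left, hmt, hkeys]
  rw [PySem.Dict.values_eq_map_keys G hnd [], hKeysB]
  apply List.map_congr_left
  intro k hk
  have hex : ∃ r ∈ rows, pvKeyOf r = k := by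
    rw [hkeys, PySem.Set.mem_ofList] at hk
    simpa using hk
  obtain ⟨r0, hr0, hk0⟩ := hex
  have hfB : (rows.map pvTagB).filter (fun r => pvTestOf r == k)
      = (rows.filter (fun r => pvKeyOf r == k)).map pvTagB := by
    rw [List.filter_map]
    congr 1
    apply List.filter_congr
    intro r _
    simp [Function.comp, pvTestOf_tag]
  have hget : G.get? k = pvRun none ((rows.filter (fun r => pvKeyOf r == k)).map pvTagB) := by
    rw [hG, ← pvStepA_eq_insert, pvGet?_fold, PySem.Dict.get?_empty]
  have hne : (rows.filter (fun r => pvKeyOf r == k)).map pvTagB ≠ [] := by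
    have hmem : r0 ∈ rows.filter (fun r => pvKeyOf r == k) :=
      List.mem_filter.mpr ⟨hr0, by simp [hk0]⟩
    intro hcon
    exact List.eq_nil_iff_forall_not_mem.mp (List.map_eq_nil_iff.mp hcon) r0 hmem
  rw [hfB]
  cases hL : (rows.filter (fun r => pvKeyOf r == k)).map pvTagB with
  | nil => exact absurd hL hne
  | cons x l =>
    rw [PySem.Dict.getD_eq_get?_getD, hget, hL]
    show (pvRun (some x) l).getD [] = pvBestB (x :: l)
    rw [pvRun_some]
    simp [pvBestB, pvScoreB_eq]
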